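-- pv_equiv track=rewrite | github.com/PLeVasseur/opencode-project-agents | fls/glossary-term-map.py | read_indented_block
-- ===== SOURCE A (Python) =====
-- def read_indented_block(
--     lines: list[str], start_index: int, base_indent: int
-- ) -> tuple[list[str], int]:
--     index = start_index
--     block_indent = None
--
--     while index < len(lines):
--         line = lines[index]
--         if line.strip() == "":
--             if count_indent(line) <= base_indent:
--                 return [], index
--             index += 1
--             continue
--
--         indent = count_indent(line)
--         if indent <= base_indent:
--             return [], index
--         block_indent = indent
--         break
--
--     if block_indent is None:
--         return [], index
--
--     block_lines: list[str] = []
--     while index < len(lines):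
--         line = lines[index]
--         if line.strip() == "":
--             if count_indent(line) <= base_indent:
--                 break
--             block_lines.append("")
--             index += 1
--             continue
--
--         indent = count_indent(line)
--         if indent < block_indent:
--             break
--
--         block_lines.append(line[block_indent:])
--         index += 1
--
--     return block_lines, index
--
-- def count_indent(line: str) -> int:
--     return len(line) - len(line.lstrip(" "))
-- ===== SOURCE B (Python) =====
-- def count_indent(line: str) -> int:
--     return len(line) - len(line.lstrip(" "))
--
--
-- def read_indented_block(
--     lines: list[str], start_index: int, base_indent: int
-- ) -> tuple[list[str], int]:
--     # Recursive decomposition: one structural recursion over the lines,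
--     # carrying the (optional) block indent and building the output on the
--     # way back up by prepending, instead of A's two imperative while-loops
--     # with an append accumulator.
--     def go(index: int, block_indent):
--         if index >= len(lines):
--             return [], index
--         line = lines[index]
--         indent = count_indent(line)
--         if line.strip() == "":
--             if indent <= base_indent:
--                 return [], index
--             if block_indent is None:
--                 return go(index + 1, None)
--             body, end = go(index + 1, block_indent)
--             return [""] + body, end
--         if block_indent is None:
--             if indent <= base_indent:
--                 return [], index
--             body, end = go(index + 1, indent)
--             return [line[indent:]] + body, end
--         if indent < block_indent:
--             return [], index
--         body, end = go(index + 1, block_indent)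
--         return [line[block_indent:]] + body, end
--
--     return go(start_index, None)
-- ===== Notes on version B (the rewrite author's own statement) =====
-- stated objective: alternative
-- what changed: A's two sequential imperative while-loops with an append accumulator are replaced by a single structural recursion over the lines that carries the optional block indent as state and builds the result list by prepending on the return path.
import Mathlib
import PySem

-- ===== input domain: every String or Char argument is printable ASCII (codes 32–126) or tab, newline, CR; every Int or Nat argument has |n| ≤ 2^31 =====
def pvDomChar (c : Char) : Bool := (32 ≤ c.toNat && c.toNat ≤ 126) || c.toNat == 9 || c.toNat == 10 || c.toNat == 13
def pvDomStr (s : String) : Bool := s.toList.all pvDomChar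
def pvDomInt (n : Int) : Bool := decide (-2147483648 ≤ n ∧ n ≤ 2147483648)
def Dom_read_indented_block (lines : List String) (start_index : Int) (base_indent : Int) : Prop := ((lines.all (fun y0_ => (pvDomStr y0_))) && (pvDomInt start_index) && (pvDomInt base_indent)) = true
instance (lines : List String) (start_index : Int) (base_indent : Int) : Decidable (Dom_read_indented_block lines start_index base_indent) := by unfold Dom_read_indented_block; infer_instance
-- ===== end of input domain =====

-- B replaces A's two imperative while-loops (append accumulator) by one structural recursion carrying the optional block indent, building the output by consing on the unwind (objective: alternative decomposition, same cost).

-- ===== PORT A =====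
-- count_indent(line) = len(line) - len(line.lstrip(" ")); lstrip(" ") drops exactly the leading spaces — exact
def pvCountIndent (line : String) : Int :=
  (line.toList.length : Int) - ((line.toList.dropWhile (· == ' ')).length : Int)

-- line.strip() == "" (Python strip of all whitespace; PySem.Chars.strip is exact on the ASCII domain)
def pvBlank (line : String) : Bool := PySem.Chars.strip line.toList == []

-- A's first while-loop: .inl (result) on an early return, .inr (index, block_indent) when the block head is found
-- (the Python local `line` is written out as lines[index] each time; same value)
def readLoop1A (lines : List String) (base_indent : Int) (index : Int) : (List String × Int) ⊕ (Int × Int) :=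
  if _h : index < (lines.length : Int) then
    if pvBlank (PySem.List.pyGetD lines index "") then
      if pvCountIndent (PySem.List.pyGetD lines index "") ≤ base_indent then .inl ([], index)
      else readLoop1A lines base_indent (index + 1)
    else
      if pvCountIndent (PySem.List.pyGetD lines index "") ≤ base_indent then .inl ([], index)
      else .inr (index, pvCountIndent (PySem.List.pyGetD lines index ""))
  else .inl ([], index)
termination_by ((lines.length : Int) - index).toNat
decreasing_by all_goals omega

-- A's second while-loop, accumulating block_lines
def readLoop2A (lines : List String) (base_indent block_indent : Int) (acc : List String) (index : Int) : List String × Int :=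
  if _h : index < (lines.length : Int) then
    if pvBlank (PySem.List.pyGetD lines index "") then
      if pvCountIndent (PySem.List.pyGetD lines index "") ≤ base_indent then (acc, index)
      else readLoop2A lines base_indent block_indent (acc ++ [""]) (index + 1)
    else
      if pvCountIndent (PySem.List.pyGetD lines index "") < block_indent then (acc, index)
      else readLoop2A lines base_indent block_indent
        (acc ++ [PySem.Str.slice (PySem.List.pyGetD lines index "") (some block_indent) none]) (index + 1)
  else (acc, index)
termination_by ((lines.length : Int) - index).toNat
decreasing_by all_goals omega

def read_indented_block (lines : List String) (start_index : Int) (base_indent : Int) : List String × Int :=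
  match readLoop1A lines base_indent start_index with
  | .inl r => r
  | .inr (index, block_indent) => readLoop2A lines base_indent block_indent [] index

-- ===== PORT B =====
-- B's single recursive `go`: optional block indent as state, output consed on the return path
def goB (lines : List String) (base_indent : Int) (index : Int) (block_indent : Option Int) : List String × Int :=
  if _h : index < (lines.length : Int) then
    let line := PySem.List.pyGetD lines index ""
    let indent := pvCountIndent line
    if pvBlank line then
      if indent ≤ base_indent then ([], index)
      else
        match block_indent with
        | none => goB lines base_indent (index + 1) none
        | some bi =>
          let r := goB lines base_indent (index + 1) (some bi)
          ("" :: r.1, r.2)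
    else
      match block_indent with
      | none =>
        if indent ≤ base_indent then ([], index)
        else
          let r := goB lines base_indent (index + 1) (some indent)
          (PySem.Str.slice line (some indent) none :: r.1, r.2)
      | some bi =>
        if indent < bi then ([], index)
        else
          let r := goB lines base_indent (index + 1) (some bi)
          (PySem.Str.slice line (some bi) none :: r.1, r.2)
  else ([], index)
termination_by ((lines.length : Int) - index).toNat
decreasing_by all_goals omega

def read_indented_block_alt (lines : List String) (start_index : Int) (base_indent : Int) : List String × Int :=
  goB lines base_indent start_index none

-- ===== PRECONDITION & SPEC =====
-- Pre_ excludes exactly the inputs where Python A raises IndexError: start_index < -len(lines)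
-- (lines[index] with index < -len(lines) raises on the first iteration).
def Pre_read_indented_block (lines : List String) (start_index : Int) (base_indent : Int) : Prop :=
  -(lines.length : Int) ≤ start_index
instance (lines : List String) (start_index : Int) (base_indent : Int) : Decidable (Pre_read_indented_block lines start_index base_indent) := by unfold Pre_read_indented_block; infer_instance

def pvWitness_read_indented_block : List String × Int × Int := (["  foo", "   bar", "x"], 0, 1)

def Spec_read_indented_block (lines : List String) (start_index : Int) (base_indent : Int) (out : List String × Int) : Prop := out = read_indented_block_alt lines start_index base_indent
instance (lines : List String) (start_index : Int) (base_indent : Int) (out : List String × Int) : Decidable (Spec_read_indented_block lines start_index base_indent out) := by unfold Spec_read_indented_block; infer_instance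

-- ===== CLAIM (what is proved, stated in full; the proofs are below) =====
def Claim_equal_read_indented_block : Prop := ∀ (lines : List String) (start_index : Int) (base_indent : Int), Dom_read_indented_block lines start_index base_indent → Pre_read_indented_block lines start_index base_indent → Spec_read_indented_block lines start_index base_indent (read_indented_block lines start_index base_indent)

-- ===== LEMMAS AND PROOFS =====

lemma loop2_eq_goB_some (lines : List String) (base_indent bi : Int) :
    ∀ (index : Int) (acc : List String),
      readLoop2A lines base_indent bi acc index =
        (acc ++ (goB lines base_indent index (some bi)).1,
         (goB lines base_indent index (some bi)).2) := by
  intro index acc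
  by_cases h1 : index < (lines.length : Int)
  · by_cases hb : pvBlank (PySem.List.pyGetD lines index "") = true
    · by_cases hc : pvCountIndent (PySem.List.pyGetD lines index "") ≤ base_indent
      · rw [readLoop2A, goB]; simp [h1, hb, hc]
      · rw [readLoop2A, goB]
        simp [h1, hb, hc, loop2_eq_goB_some lines base_indent bi (index + 1)]
    · by_cases hc : pvCountIndent (PySem.List.pyGetD lines index "") < bi
      · rw [readLoop2A, goB]; simp [h1, hb, hc]
      · rw [readLoop2A, goB]
        simp [h1, hb, hc, loop2_eq_goB_some lines base_indent bi (index + 1)]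
  · rw [readLoop2A, goB]; simp [h1]
termination_by index => ((lines.length : Int) - index).toNat
decreasing_by all_goals omega

lemma a_eq_goB_none (lines : List String) (base_indent : Int) :
    ∀ index : Int,
      (match readLoop1A lines base_indent index with
       | .inl r => r
       | .inr (i, bi) => readLoop2A lines base_indent bi [] i) =
      goB lines base_indent index none := by
  intro index
  by_cases h1 : index < (lines.length : Int)
  · by_cases hb : pvBlank (PySem.List.pyGetD lines index "") = true
    · by_cases hc : pvCountIndent (PySem.List.pyGetD lines index "") ≤ base_indent
      · rw [readLoop1A, goB]; simp [h1, hb, hc]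
      · rw [readLoop1A, goB]
        simp only [dif_pos h1, if_pos hb, if_neg hc]
        exact a_eq_goB_none lines base_indent (index + 1)
    · by_cases hc : pvCountIndent (PySem.List.pyGetD lines index "") ≤ base_indent
      · rw [readLoop1A, goB]; simp [h1, hb, hc]
      · rw [readLoop1A, goB]
        simp only [dif_pos h1, Bool.not_eq_true] at *
        rw [if_neg (by simp [hb]), if_neg hc, if_neg (by simp [hb]), if_neg hc]
        -- block head found: one step of A's second loop, then the accumulator lemma
        show readLoop2A lines base_indent (pvCountIndent (PySem.List.pyGetD lines index "")) [] index = _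
        rw [readLoop2A]
        rw [dif_pos h1, if_neg (by simp [hb]), if_neg (by omega),
            loop2_eq_goB_some lines base_indent _ (index + 1)]
        simp
  · rw [readLoop1A, goB]; simp [h1]
termination_by index => ((lines.length : Int) - index).toNat
decreasing_by all_goals omega

-- ===== VERDICT (by name: the statement is the Claim_ definition above) =====
theorem read_indented_block_spec : Claim_equal_read_indented_block := by
  intro lines start_index base_indent _hdom _hpre
  unfold Spec_read_indented_block read_indented_block read_indented_block_alt
  exact a_eq_goB_none lines base_indent start_index
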